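-- pv_equiv track=rewrite | github.com/martinwangjun/python_study | 00_codewars/first-variation-on-caesar-cipher.py | moving_shift
-- ===== SOURCE A (Python) =====
-- def shift_char(c, shift):
--   a = ord(c)
--   if c.isupper():
--     a = ord('A') + ((ord(c) + shift - ord('A')) % 26)
--   if c.islower():
--     a = ord('a') + ((ord(c) + shift - ord('a')) % 26)
--   return chr(a)
--
-- def moving_shift(s, shift):
--   m, n = divmod(len(s), 5)
--   if n > 0:
--     m += 1
--
--   # s2 = ''.join(map(lambda c: chr(ord(c) + shift) if c.isalpha() else c, s))
--   l = []
--   for i, c in enumerate(s):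
--     l.append(shift_char(c, i + shift))
--   l = ''.join(l)
--   l2 = ['', '', '', '', '']
--   for i, c in enumerate(l):
--     l2[i//m] += c
--   return l2
-- ===== SOURCE B (Python) =====
-- def shift_char(c, k):
--     if 'A' <= c <= 'Z':
--         return chr(65 + (ord(c) - 65 + k) % 26)
--     if 'a' <= c <= 'z':
--         return chr(97 + (ord(c) - 97 + k) % 26)
--     return c
--
-- def moving_shift(s, shift):
--     shifted = ''.join(shift_char(c, i + shift) for i, c in enumerate(s))
--     m = (len(s) + 4) // 5
--     return [shifted[j*m:(j+1)*m] for j in range(5)]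
-- ===== Notes on version B (the rewrite author's own statement) =====
-- stated objective: alternative
-- what changed: B builds the whole shifted string once (guard-and-return character shifter instead of A's sequential reassignment) and produces the five pieces by contiguous slicing with chunk size ceil(len/5), replacing A's per-character bucket loop l2[i//m] += c with five slice operations.
import Mathlib
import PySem

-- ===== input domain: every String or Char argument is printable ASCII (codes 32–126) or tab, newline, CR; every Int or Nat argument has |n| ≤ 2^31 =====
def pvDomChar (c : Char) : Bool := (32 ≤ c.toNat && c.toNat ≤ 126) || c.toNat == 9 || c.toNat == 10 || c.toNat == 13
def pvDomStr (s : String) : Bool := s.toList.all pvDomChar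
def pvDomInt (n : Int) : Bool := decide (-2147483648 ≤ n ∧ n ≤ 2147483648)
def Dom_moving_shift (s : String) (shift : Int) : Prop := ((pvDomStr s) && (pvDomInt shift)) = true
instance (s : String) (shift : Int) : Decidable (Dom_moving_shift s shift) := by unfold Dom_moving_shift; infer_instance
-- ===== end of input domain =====

-- B replaces A's per-character bucket loop (l2[i//m] += c) with one shifted string and five
-- contiguous slices of size ceil(len/5): an alternative decomposition, same O(n) cost.

-- ===== PORT A =====
-- shift_char: a = ord(c); two sequential conditional reassignments; chr(a).
-- chr(a) is ported as Char.ofNat a.toNat — exact here: a is always a valid ASCII code (0 ≤ a < 0xD800).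
def pvShiftCharA (c : Char) (shift : Int) : Char :=
  let a : Int := (c.toNat : Int)
  let a : Int := if PySem.Chars.isupper c then 65 + PySem.Int.mod ((c.toNat : Int) + shift - 65) 26 else a
  let a : Int := if PySem.Chars.islower c then 97 + PySem.Int.mod ((c.toNat : Int) + shift - 97) 26 else a
  Char.ofNat a.toNat

-- Python's l2 holds five growing strings; ported as List (List Char) joined by String.ofList at the end (exact).
def moving_shift (s : String) (shift : Int) : List String :=
  let len : Int := (s.toList.length : Int)
  let m : Int := PySem.Int.floordiv len 5
  let n : Int := PySem.Int.mod len 5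
  let m : Int := if n > 0 then m + 1 else m
  let l : List Char := (PySem.List.enumerate s.toList).foldl
    (fun acc ic => acc ++ [pvShiftCharA ic.2 (ic.1 + shift)]) []
  let l2 : List (List Char) := (PySem.List.enumerate l).foldl
    (fun l2 ic =>
      PySem.List.pySetD l2 (PySem.Int.floordiv ic.1 m)
        (PySem.List.pyGetD l2 (PySem.Int.floordiv ic.1 m) [] ++ [ic.2]))
    [[], [], [], [], []]
  l2.map String.ofList

-- ===== PORT B =====
def pvShiftCharB (c : Char) (k : Int) : Char :=
  if 'A' ≤ c ∧ c ≤ 'Z' then Char.ofNat (65 + PySem.Int.mod ((c.toNat : Int) - 65 + k) 26).toNat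
  else if 'a' ≤ c ∧ c ≤ 'z' then Char.ofNat (97 + PySem.Int.mod ((c.toNat : Int) - 97 + k) 26).toNat
  else c

def moving_shift_alt (s : String) (shift : Int) : List String :=
  let shifted : List Char := (PySem.List.enumerate s.toList).map
    (fun ic => pvShiftCharB ic.2 (ic.1 + shift))
  let m : Int := PySem.Int.floordiv ((s.toList.length : Int) + 4) 5
  (PySem.List.pyRange 0 5 1).map
    (fun j => String.ofList (PySem.List.slice shifted (some (j * m)) (some ((j + 1) * m))))

-- ===== PRECONDITION & SPEC =====
def Spec_moving_shift (s : String) (shift : Int) (out : List String) : Prop := out = moving_shift_alt s shift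
instance (s : String) (shift : Int) (out : List String) : Decidable (Spec_moving_shift s shift out) := by unfold Spec_moving_shift; infer_instance

-- ===== CLAIM (what is proved, stated in full; the proofs are below) =====
def Claim_equal_moving_shift : Prop := ∀ (s : String) (shift : Int), Dom_moving_shift s shift → Spec_moving_shift s shift (moving_shift s shift)

-- ===== LEMMAS AND PROOFS =====

-- the j-th contiguous chunk of size m
def pvChunk (m : Nat) (L : List Char) (j : Nat) : List Char := (L.drop (j * m)).take m
def pvChunks (m : Nat) (L : List Char) : List (List Char) :=
  [pvChunk m L 0, pvChunk m L 1, pvChunk m L 2, pvChunk m L 3, pvChunk m L 4]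

theorem pvShiftChar_eq (c : Char) (k : Int) : pvShiftCharA c k = pvShiftCharB c k := by
  unfold pvShiftCharA pvShiftCharB
  have hU : (PySem.Chars.isupper c = true) ↔ ('A' ≤ c ∧ c ≤ 'Z') := by
    simp [PySem.Chars.isupper]
  have hL : (PySem.Chars.islower c = true) ↔ ('a' ≤ c ∧ c ≤ 'z') := by
    simp [PySem.Chars.islower]
  have hUL : ¬(('A' ≤ c ∧ c ≤ 'Z') ∧ ('a' ≤ c ∧ c ≤ 'z')) :=
    fun h => absurd (h.2.1.trans h.1.2) (by decide)
  rw [show ((c.toNat : Int) + k - 65) = ((c.toNat : Int) - 65 + k) from by ring,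
    show ((c.toNat : Int) + k - 97) = ((c.toNat : Int) - 97 + k) from by ring]
  by_cases h1 : 'A' ≤ c ∧ c ≤ 'Z'
  · have hu : PySem.Chars.isupper c = true := hU.2 h1
    have hl : PySem.Chars.islower c = false := by
      rw [Bool.eq_false_iff]; intro hT; exact hUL ⟨h1, hL.1 hT⟩
    conv_lhs => simp only [hu, hl, if_true, Bool.false_eq_true, if_false]
    rw [if_pos h1]
  · have hu : PySem.Chars.isupper c = false := by
      rw [Bool.eq_false_iff]; intro hT; exact h1 (hU.1 hT)
    by_cases h2 : 'a' ≤ c ∧ c ≤ 'z'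
    · have hl : PySem.Chars.islower c = true := hL.2 h2
      conv_lhs => simp only [hu, hl, if_true, Bool.false_eq_true, if_false]
      rw [if_neg h1, if_pos h2]
    · have hl : PySem.Chars.islower c = false := by
        rw [Bool.eq_false_iff]; intro hT; exact h2 (hL.1 hT)
      conv_lhs => simp only [hu, hl, Bool.false_eq_true, if_false]
      rw [if_neg h1, if_neg h2, Int.toNat_natCast, Char.ofNat_toNat]

theorem pvEnum_snoc {α : Type} (L : List α) (x : α) (s : Int) :
    PySem.List.enumerate (L ++ [x]) s = PySem.List.enumerate L s ++ [(s + L.length, x)] := by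
  induction L generalizing s with
  | nil => simp [PySem.List.enumerate_cons, PySem.List.enumerate_nil]
  | cons a L ih =>
    simp only [List.cons_append, PySem.List.enumerate_cons, ih, List.length_cons,
      Nat.cast_add, Nat.cast_one]
    rw [show s + 1 + (L.length : Int) = s + ((L.length : Int) + 1) from by ring]

theorem pvChunk_snoc (m : Nat) (L : List Char) (c : Char) (j : Nat) :
    pvChunk m (L ++ [c]) j =
      if j * m ≤ L.length ∧ L.length < j * m + m then pvChunk m L j ++ [c] else pvChunk m L j := by
  unfold pvChunk
  generalize j * m = a
  rcases Nat.lt_or_ge L.length a with h | h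
  · rw [if_neg (by omega), List.drop_eq_nil_of_le (by simp; omega),
      List.drop_eq_nil_of_le (by omega)]
  · rw [List.drop_append_of_le_length h]
    rcases Nat.lt_or_ge L.length (a + m) with h2 | h2
    · rw [if_pos ⟨h, h2⟩,
        List.take_of_length_le (by simp [List.length_drop]; omega),
        List.take_of_length_le (by simp [List.length_drop]; omega)]
    · rw [if_neg (by omega),
        List.take_append_of_le_length (by simp [List.length_drop]; omega)]

theorem pvBuckets_eq (m : Nat) : ∀ (L : List Char), L.length ≤ 5 * m →
    (PySem.List.enumerate L).foldl
      (fun l2 ic =>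
        PySem.List.pySetD l2 (PySem.Int.floordiv ic.1 (m : Int))
          (PySem.List.pyGetD l2 (PySem.Int.floordiv ic.1 (m : Int)) [] ++ [ic.2]))
      [[], [], [], [], []]
    = pvChunks m L := by
  intro L
  induction L using List.reverseRecOn with
  | nil => intro _; simp [PySem.List.enumerate_nil, pvChunks, pvChunk]
  | append_singleton L c ih =>
    intro hL
    have hL1 : L.length + 1 ≤ 5 * m := by simpa using hL
    have hm : 0 < m := by omega
    have hL' : L.length ≤ 5 * m := by omega
    rw [pvEnum_snoc, List.foldl_append, ih hL']
    simp only [List.foldl_cons, List.foldl_nil, zero_add]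
    rw [PySem.Int.floordiv_natCast, PySem.List.pySetD_natCast, PySem.List.pyGetD_natCast]
    have hj0 : L.length / m < 5 := (Nat.div_lt_iff_lt_mul hm).2 (by omega)
    have h1 : L.length / m * m ≤ L.length := Nat.div_mul_le_self _ _
    have h2 : L.length < L.length / m * m + m := by
      have hdm := Nat.div_add_mod L.length m
      have hmod := Nat.mod_lt L.length hm
      calc L.length = m * (L.length / m) + L.length % m := (Nat.div_add_mod _ _).symm
        _ < m * (L.length / m) + m := Nat.add_lt_add_left hmod _
        _ = L.length / m * m + m := by rw [Nat.mul_comm]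
    generalize hq : L.length / m = j0 at hj0 h1 h2 ⊢
    interval_cases j0
    · rw [show (pvChunks m L).set 0 ((pvChunks m L).getD 0 [] ++ [c])
          = [pvChunk m L 0 ++ [c], pvChunk m L 1, pvChunk m L 2, pvChunk m L 3, pvChunk m L 4] from rfl]
      simp only [pvChunks]
      rw [pvChunk_snoc, pvChunk_snoc, pvChunk_snoc, pvChunk_snoc, pvChunk_snoc,
        if_pos ⟨by omega, by omega⟩, if_neg (by omega), if_neg (by omega),
        if_neg (by omega), if_neg (by omega)]
    · rw [show (pvChunks m L).set 1 ((pvChunks m L).getD 1 [] ++ [c])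
          = [pvChunk m L 0, pvChunk m L 1 ++ [c], pvChunk m L 2, pvChunk m L 3, pvChunk m L 4] from rfl]
      simp only [pvChunks]
      rw [pvChunk_snoc, pvChunk_snoc, pvChunk_snoc, pvChunk_snoc, pvChunk_snoc,
        if_neg (by omega), if_pos ⟨by omega, by omega⟩, if_neg (by omega),
        if_neg (by omega), if_neg (by omega)]
    · rw [show (pvChunks m L).set 2 ((pvChunks m L).getD 2 [] ++ [c])
          = [pvChunk m L 0, pvChunk m L 1, pvChunk m L 2 ++ [c], pvChunk m L 3, pvChunk m L 4] from rfl]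
      simp only [pvChunks]
      rw [pvChunk_snoc, pvChunk_snoc, pvChunk_snoc, pvChunk_snoc, pvChunk_snoc,
        if_neg (by omega), if_neg (by omega), if_pos ⟨by omega, by omega⟩,
        if_neg (by omega), if_neg (by omega)]
    · rw [show (pvChunks m L).set 3 ((pvChunks m L).getD 3 [] ++ [c])
          = [pvChunk m L 0, pvChunk m L 1, pvChunk m L 2, pvChunk m L 3 ++ [c], pvChunk m L 4] from rfl]
      simp only [pvChunks]
      rw [pvChunk_snoc, pvChunk_snoc, pvChunk_snoc, pvChunk_snoc, pvChunk_snoc,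
        if_neg (by omega), if_neg (by omega), if_neg (by omega),
        if_pos ⟨by omega, by omega⟩, if_neg (by omega)]
    · rw [show (pvChunks m L).set 4 ((pvChunks m L).getD 4 [] ++ [c])
          = [pvChunk m L 0, pvChunk m L 1, pvChunk m L 2, pvChunk m L 3, pvChunk m L 4 ++ [c]] from rfl]
      simp only [pvChunks]
      rw [pvChunk_snoc, pvChunk_snoc, pvChunk_snoc, pvChunk_snoc, pvChunk_snoc,
        if_neg (by omega), if_neg (by omega), if_neg (by omega),
        if_neg (by omega), if_pos ⟨by omega, by omega⟩]

theorem pvSlice_chunk (M : Nat) (L : List Char) (j : Nat) :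
    PySem.List.slice L (some ((j : Int) * (M : Int))) (some (((j : Int) + 1) * (M : Int)))
      = pvChunk M L j := by
  have h1 : ((j : Int) * (M : Int)) = (((j * M : Nat)) : Int) := by push_cast; ring
  have h2 : (((j : Int) + 1) * (M : Int)) = (((j * M : Nat)) : Int) + ((M : Nat) : Int) := by
    push_cast; ring
  rw [h1, h2, PySem.List.slice_natCast_add]
  rfl

-- ===== VERDICT (by name: the statement is the Claim_ definition above) =====
theorem moving_shift_spec : Claim_equal_moving_shift := by
  intro s shift _
  unfold Spec_moving_shift
  simp only [moving_shift, moving_shift_alt]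
  rw [PySem.List.foldl_append_singleton_eq_map]
  have hmap : (fun (ic : Int × Char) => pvShiftCharA ic.2 (ic.1 + shift))
      = fun (ic : Int × Char) => pvShiftCharB ic.2 (ic.1 + shift) :=
    funext fun ic => pvShiftChar_eq ic.2 (ic.1 + shift)
  rw [hmap]
  set n := s.toList.length with hn
  set L := (PySem.List.enumerate s.toList).map
    (fun (ic : Int × Char) => pvShiftCharB ic.2 (ic.1 + shift)) with hLdef
  have hLlen : L.length = n := by
    rw [hLdef, List.length_map, PySem.List.length_enumerate]
  have hmA : (if PySem.Int.mod (n : Int) 5 > 0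
        then PySem.Int.floordiv (n : Int) 5 + 1 else PySem.Int.floordiv (n : Int) 5)
      = (((n + 4) / 5 : Nat) : Int) := by
    rw [show ((5:Int)) = ((5:Nat):Int) from rfl, PySem.Int.floordiv_natCast, PySem.Int.mod_natCast]
    split_ifs with h <;> omega
  have hmB : PySem.Int.floordiv ((n : Int) + 4) 5 = (((n + 4) / 5 : Nat) : Int) := by
    rw [show ((n : Int) + 4) = (((n + 4 : Nat)) : Int) from by push_cast; ring,
      show ((5:Int)) = ((5:Nat):Int) from rfl, PySem.Int.floordiv_natCast]
  rw [hmA, hmB]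
  simp only [List.nil_append]
  rw [pvBuckets_eq ((n + 4) / 5) L (by rw [hLlen]; omega)]
  rw [show PySem.List.pyRange 0 5 1 = [0, 1, 2, 3, 4] from rfl]
  simp only [List.map_cons, List.map_nil, pvChunks]
  have e0 := pvSlice_chunk ((n + 4) / 5) L 0
  have e1 := pvSlice_chunk ((n + 4) / 5) L 1
  have e2 := pvSlice_chunk ((n + 4) / 5) L 2
  have e3 := pvSlice_chunk ((n + 4) / 5) L 3
  have e4 := pvSlice_chunk ((n + 4) / 5) L 4
  norm_num at e0 e1 e2 e3 e4 ⊢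
  rw [e0, e1, e2, e3, e4]
  exact ⟨rfl, rfl, rfl, rfl, rfl⟩
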